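-- pv_equiv track=rewrite | github.com/LauraOD1211/FinalYearProject | main.py | getBiggestRun
-- ===== SOURCE A (Python) =====
-- def getBiggestRun(times):
--     curr_run = 0
--     best = 0
--     for x in range(1, 6):
--         for y in range(1, 9):
--             time = "Day " + str(x) + " Time " + str(y)
--             if time in times:
--                 curr_run = curr_run + 1
--             else:
--                 if curr_run > best:
--                     best = curr_run
--                 curr_run = 0
--         if curr_run > best:
--             best = curr_run
--         curr_run = 0
--     return best
-- ===== SOURCE B (Python) =====
-- def getBiggestRun(times):
--     best = 0
--     for x in range(1, 6):
--         bits = "".join("1" if "Day " + str(x) + " Time " + str(y) in times else "0" for y in range(1, 9))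
--         day_best = max(len(run) for run in bits.split("0"))
--         best = max(best, day_best)
--     return best
-- ===== Notes on version B (the rewrite author's own statement) =====
-- stated objective: alternative
-- what changed: A's inline accumulate-and-reset run counter is replaced by building, per day, a '1'/'0' bitstring of present slots and taking the max length of its split('0') pieces, with the per-day maxima combined by max().
import Mathlib
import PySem

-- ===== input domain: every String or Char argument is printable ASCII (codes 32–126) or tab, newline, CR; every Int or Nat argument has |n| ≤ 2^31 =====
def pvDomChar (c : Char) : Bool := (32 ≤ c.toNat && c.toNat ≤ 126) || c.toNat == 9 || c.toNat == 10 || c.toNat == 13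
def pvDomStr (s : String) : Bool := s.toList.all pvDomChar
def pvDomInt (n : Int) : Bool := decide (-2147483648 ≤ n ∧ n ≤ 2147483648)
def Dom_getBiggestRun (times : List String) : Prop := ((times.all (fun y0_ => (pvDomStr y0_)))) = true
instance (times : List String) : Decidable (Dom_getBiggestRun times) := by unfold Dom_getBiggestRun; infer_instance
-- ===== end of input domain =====

-- B replaces A's inline accumulate-and-reset counter with a build-bitstring-then-split-on-'0' summary per day (alternative decomposition, same cost).

-- ===== PORT A =====
def getBiggestRun (times : List String) : Int :=
  ((PySem.List.pyRange 1 6 1).foldl (fun (st : Int × Int) x =>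
      let st2 := (PySem.List.pyRange 1 9 1).foldl (fun (st : Int × Int) y =>
          let time := "Day " ++ PySem.Int.toStr x ++ " Time " ++ PySem.Int.toStr y
          if times.contains time then (st.1 + 1, st.2)
          else (0, if st.1 > st.2 then st.1 else st.2)) st
      ((0 : Int), if st2.1 > st2.2 then st2.1 else st2.2)) (0, 0)).2

-- ===== PORT B =====
def getBiggestRun_alt (times : List String) : Int :=
  (PySem.List.pyRange 1 6 1).foldl (fun (best : Int) x =>
    let bits := PySem.Str.join "" ((PySem.List.pyRange 1 9 1).map (fun y =>
      if times.contains ("Day " ++ PySem.Int.toStr x ++ " Time " ++ PySem.Int.toStr y) then "1" else "0"))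
    -- bits.split("0"): split? returns none only for sep = "", so the getD [] branch is unreachable
    let dayBest : Int :=
      match PySem.List.max? (((PySem.Str.split? bits "0").getD []).map (fun run => PySem.Str.len run)) (fun v => v) with
      | some m => m
      | none => 0   -- unreachable: str.split with a separator never yields an empty list
    max best dayBest) 0

-- ===== PRECONDITION & SPEC =====
def Spec_getBiggestRun (times : List String) (out : Int) : Prop := out = getBiggestRun_alt times
instance (times : List String) (out : Int) : Decidable (Spec_getBiggestRun times out) := by unfold Spec_getBiggestRun; infer_instance

-- ===== CLAIM (what is proved, stated in full; the proofs are below) =====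
def Claim_equal_getBiggestRun : Prop := ∀ (times : List String), Dom_getBiggestRun times → Spec_getBiggestRun times (getBiggestRun times)

-- ===== LEMMAS AND PROOFS =====

/-- max run length of a list of booleans, with a pending run of length `curr`. -/
def pvG (curr : Int) : List Bool → Int
  | [] => curr
  | true :: t => pvG (curr + 1) t
  | false :: t => max curr (pvG 0 t)

lemma pvRange19 : PySem.List.pyRange 1 9 1 = [1,2,3,4,5,6,7,8] := by decide

lemma pvRange16 : PySem.List.pyRange 1 6 1 = [1,2,3,4,5] := by decide

lemma pvFlushMax (curr best : Int) : (if curr > best then curr else best) = max best curr := by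
  simp only [max_def]; split_ifs <;> omega

/-- A's inner counter loop, flushed, computes `max best (pvG curr bs)`. -/
lemma pvRunFlush (bs : List Bool) (curr best : Int) :
    (let st := bs.foldl (fun (st : Int × Int) c =>
        if c then (st.1 + 1, st.2) else (0, if st.1 > st.2 then st.1 else st.2)) (curr, best)
     if st.1 > st.2 then st.1 else st.2) = max best (pvG curr bs) := by
  induction bs generalizing curr best with
  | nil => simpa only [List.foldl, pvG] using pvFlushMax curr best
  | cons c t ih =>
    cases c with
    | true => simpa only [List.foldl, pvG, if_pos] using ih (curr + 1) best
    | false =>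
      simp only [List.foldl, pvG, Bool.false_eq_true, if_false, pvFlushMax curr best]
      rw [ih 0 (max best curr), max_assoc]

/-- packaging of `pvRunFlush` as an equality of pairs, zeta-reduced. -/
lemma pvRunFlushPair (bs : List Bool) (best : Int) :
    ((0 : Int),
      if (bs.foldl (fun (st : Int × Int) c =>
            if c then (st.1 + 1, st.2) else (0, if st.1 > st.2 then st.1 else st.2)) (0, best)).1 >
         (bs.foldl (fun (st : Int × Int) c =>
            if c then (st.1 + 1, st.2) else (0, if st.1 > st.2 then st.1 else st.2)) (0, best)).2 then
         (bs.foldl (fun (st : Int × Int) c =>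
            if c then (st.1 + 1, st.2) else (0, if st.1 > st.2 then st.1 else st.2)) (0, best)).1 else
         (bs.foldl (fun (st : Int × Int) c =>
            if c then (st.1 + 1, st.2) else (0, if st.1 > st.2 then st.1 else st.2)) (0, best)).2)
    = ((0 : Int), max best (pvG 0 bs)) :=
  congrArg _ (pvRunFlush bs 0 best)

/-- A's inner fold over slot numbers equals the counter fold over the membership booleans. -/
lemma pvFoldContains (times : List String) (x : Int) (l : List Int) (st : Int × Int) :
    l.foldl (fun (st : Int × Int) y =>
        if times.contains ("Day " ++ PySem.Int.toStr x ++ " Time " ++ PySem.Int.toStr y) then (st.1 + 1, st.2)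
        else (0, if st.1 > st.2 then st.1 else st.2)) st
    = (l.map (fun y => times.contains ("Day " ++ PySem.Int.toStr x ++ " Time " ++ PySem.Int.toStr y))).foldl
        (fun (st : Int × Int) c =>
          if c then (st.1 + 1, st.2) else (0, if st.1 > st.2 then st.1 else st.2)) st := by
  induction l generalizing st with
  | nil => rfl
  | cons h t ih => simp only [List.foldl, List.map]; rw [ih]

/-- B's bitstring-split computation agrees with `pvG 0` on 8 booleans. -/
lemma pvM_eq_g : ∀ c1 c2 c3 c4 c5 c6 c7 c8 : Bool,
    (match PySem.List.max? (((PySem.Str.split? (PySem.Str.join ""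
        [(if c1 then "1" else "0"), (if c2 then "1" else "0"),
         (if c3 then "1" else "0"), (if c4 then "1" else "0"), (if c5 then "1" else "0"),
         (if c6 then "1" else "0"), (if c7 then "1" else "0"), (if c8 then "1" else "0")]) "0").getD []).map
          (fun run => PySem.Str.len run)) (fun v => v) with
      | some m => m
      | none => (0 : Int)) = pvG 0 [c1, c2, c3, c4, c5, c6, c7, c8] := by
  decide

/-- scalar (projection-reduced) version of `pvRunFlush`. -/
lemma pvRunFlushScalar (bs : List Bool) (best : Int) :
    (if (bs.foldl (fun (st : Int × Int) c =>
            if c then (st.1 + 1, st.2) else (0, if st.1 > st.2 then st.1 else st.2)) (0, best)).1 >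
        (bs.foldl (fun (st : Int × Int) c =>
            if c then (st.1 + 1, st.2) else (0, if st.1 > st.2 then st.1 else st.2)) (0, best)).2 then
        (bs.foldl (fun (st : Int × Int) c =>
            if c then (st.1 + 1, st.2) else (0, if st.1 > st.2 then st.1 else st.2)) (0, best)).1 else
        (bs.foldl (fun (st : Int × Int) c =>
            if c then (st.1 + 1, st.2) else (0, if st.1 > st.2 then st.1 else st.2)) (0, best)).2)
    = max best (pvG 0 bs) :=
  pvRunFlush bs 0 best

/-- the last day of A, already projected to the running best, as `max best` of B's day value. -/
lemma pvDayStepScalar (times : List String) (x best : Int) :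
    (if ((PySem.List.pyRange 1 9 1).foldl (fun (st : Int × Int) y =>
            if times.contains ("Day " ++ PySem.Int.toStr x ++ " Time " ++ PySem.Int.toStr y) then (st.1 + 1, st.2)
            else (0, if st.1 > st.2 then st.1 else st.2)) (0, best)).1 >
        ((PySem.List.pyRange 1 9 1).foldl (fun (st : Int × Int) y =>
            if times.contains ("Day " ++ PySem.Int.toStr x ++ " Time " ++ PySem.Int.toStr y) then (st.1 + 1, st.2)
            else (0, if st.1 > st.2 then st.1 else st.2)) (0, best)).2 then
        ((PySem.List.pyRange 1 9 1).foldl (fun (st : Int × Int) y =>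
            if times.contains ("Day " ++ PySem.Int.toStr x ++ " Time " ++ PySem.Int.toStr y) then (st.1 + 1, st.2)
            else (0, if st.1 > st.2 then st.1 else st.2)) (0, best)).1 else
        ((PySem.List.pyRange 1 9 1).foldl (fun (st : Int × Int) y =>
            if times.contains ("Day " ++ PySem.Int.toStr x ++ " Time " ++ PySem.Int.toStr y) then (st.1 + 1, st.2)
            else (0, if st.1 > st.2 then st.1 else st.2)) (0, best)).2)
    = max best
        (match PySem.List.max? (((PySem.Str.split? (PySem.Str.join ""
            ((PySem.List.pyRange 1 9 1).map (fun y =>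
              if times.contains ("Day " ++ PySem.Int.toStr x ++ " Time " ++ PySem.Int.toStr y) then "1" else "0")))
            "0").getD []).map (fun run => PySem.Str.len run)) (fun v => v) with
          | some m => m
          | none => (0 : Int)) := by
  rw [pvFoldContains, pvRange19]
  simp only [List.map]
  rw [pvRunFlushScalar]
  rw [pvM_eq_g]

/-- One day of A (starting with a flushed counter) updates `best` to `max best` of B's day value. -/
lemma pvDayStep (times : List String) (x best : Int) :
    ((0 : Int),
      if ((PySem.List.pyRange 1 9 1).foldl (fun (st : Int × Int) y =>
            if times.contains ("Day " ++ PySem.Int.toStr x ++ " Time " ++ PySem.Int.toStr y) then (st.1 + 1, st.2)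
            else (0, if st.1 > st.2 then st.1 else st.2)) (0, best)).1 >
         ((PySem.List.pyRange 1 9 1).foldl (fun (st : Int × Int) y =>
            if times.contains ("Day " ++ PySem.Int.toStr x ++ " Time " ++ PySem.Int.toStr y) then (st.1 + 1, st.2)
            else (0, if st.1 > st.2 then st.1 else st.2)) (0, best)).2 then
         ((PySem.List.pyRange 1 9 1).foldl (fun (st : Int × Int) y =>
            if times.contains ("Day " ++ PySem.Int.toStr x ++ " Time " ++ PySem.Int.toStr y) then (st.1 + 1, st.2)
            else (0, if st.1 > st.2 then st.1 else st.2)) (0, best)).1 else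
         ((PySem.List.pyRange 1 9 1).foldl (fun (st : Int × Int) y =>
            if times.contains ("Day " ++ PySem.Int.toStr x ++ " Time " ++ PySem.Int.toStr y) then (st.1 + 1, st.2)
            else (0, if st.1 > st.2 then st.1 else st.2)) (0, best)).2)
    = ((0 : Int), max best
        (match PySem.List.max? (((PySem.Str.split? (PySem.Str.join ""
            ((PySem.List.pyRange 1 9 1).map (fun y =>
              if times.contains ("Day " ++ PySem.Int.toStr x ++ " Time " ++ PySem.Int.toStr y) then "1" else "0")))
            "0").getD []).map (fun run => PySem.Str.len run)) (fun v => v) with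
          | some m => m
          | none => (0 : Int))) := by
  rw [pvFoldContains, pvRange19]
  simp only [List.map]
  rw [pvRunFlushPair]
  rw [pvM_eq_g]

-- ===== VERDICT (by name: the statement is the Claim_ definition above) =====
theorem getBiggestRun_spec : Claim_equal_getBiggestRun := by
  intro times _
  show getBiggestRun times = getBiggestRun_alt times
  unfold getBiggestRun getBiggestRun_alt
  rw [pvRange16]
  simp only [List.foldl]
  rw [pvDayStep times 1, pvDayStep times 2, pvDayStep times 3, pvDayStep times 4,
     pvDayStepScalar times 5]
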